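-- pv_equiv track=rewrite | github.com/mouseratti/bas | src/bas/1_start/task_19/task_19.py | consonants
-- ===== SOURCE A (Python) =====
-- def consonants(text):
-- 	n = 0
-- 	ls_a = list(text.lower())
-- 	ls_a.sort()
-- 	dict_con = {}
-- 	list_con = ['b', 'c', 'd', 'e', 'f', 'g', 'h', 'j', 'k', 'l', 'm', 'n', 'p', 'q', 'r', 's', 't', 'v', 'w', 'x', 'z']
-- 	for x in list_con:
-- 		for y in ls_a:
-- 			if x in y:
-- 				n += 1
--
-- 		dict_con.update({x:n})
-- 		n = 0
-- 	return dict_con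
-- ===== SOURCE B (Python) =====
-- def consonants(text):
--     counts = {}
--     for ch in text.lower():
--         counts[ch] = counts.get(ch, 0) + 1
--     return {c: counts.get(c, 0) for c in 'bcdefghjklmnpqrstvwxz'}
-- ===== Notes on version B (the rewrite author's own statement) =====
-- stated objective: faster
-- what changed: B makes one counting pass over the lowered text into a dict and then looks each consonant up, instead of A's re-scan of the whole (sorted) character list once per consonant (21 full passes plus a useless sort).
import Mathlib
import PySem

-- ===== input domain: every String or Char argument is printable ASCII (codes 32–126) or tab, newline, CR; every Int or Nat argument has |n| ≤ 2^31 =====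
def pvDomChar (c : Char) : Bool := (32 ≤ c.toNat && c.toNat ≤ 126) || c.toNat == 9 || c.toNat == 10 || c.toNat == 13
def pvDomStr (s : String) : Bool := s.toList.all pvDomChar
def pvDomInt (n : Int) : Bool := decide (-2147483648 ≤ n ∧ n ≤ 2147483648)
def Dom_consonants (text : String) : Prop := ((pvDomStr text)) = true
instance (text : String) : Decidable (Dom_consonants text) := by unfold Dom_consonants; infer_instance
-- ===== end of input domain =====

-- B replaces A's 21 full scans of the sorted character list with one counting pass and a lookup per consonant (faster).

-- ===== PORT A =====
-- list(text.lower()) is a list of single characters; 'x in y' for single-character x, y is ported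
-- as PySem.Chars.isIn [x] [y] (exact: substring test on one-character strings).
def consonants (text : String) : List (String × Int) :=
  let ls_a : List Char := PySem.List.sorted (PySem.Chars.lower text.toList) (fun c => c) false
  let list_con : List Char := ['b','c','d','e','f','g','h','j','k','l','m','n','p','q','r','s','t','v','w','x','z']
  (list_con.foldl (fun (d : PySem.Dict String Int) x =>
      let n : Int := ls_a.foldl (fun n y => if PySem.Chars.isIn [x] [y] then n + 1 else n) 0
      d.insert (String.ofList [x]) n) PySem.Dict.empty).items

-- ===== PORT B =====
def consonants_alt (text : String) : List (String × Int) :=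
  let counts : PySem.Dict Char Int :=
    (PySem.Chars.lower text.toList).foldl (fun d ch => d.insert ch (d.getD ch 0 + 1)) PySem.Dict.empty
  (("bcdefghjklmnpqrstvwxz".toList).foldl (fun (d : PySem.Dict String Int) c =>
      d.insert (String.ofList [c]) (counts.getD c 0)) PySem.Dict.empty).items

-- ===== PRECONDITION & SPEC =====
def Spec_consonants (text : String) (out : List (String × Int)) : Prop := out = consonants_alt text
instance (text : String) (out : List (String × Int)) : Decidable (Spec_consonants text out) := by unfold Spec_consonants; infer_instance

-- ===== CLAIM (what is proved, stated in full; the proofs are below) =====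
def Claim_equal_consonants : Prop := ∀ (text : String), Dom_consonants text → Spec_consonants text (consonants text)

-- ===== LEMMAS AND PROOFS =====

-- 'x in y' on one-character strings is character equality
theorem isIn_single (x y : Char) : PySem.Chars.isIn [x] [y] = (y == x) := by
  by_cases h : y = x
  · subst h
    simp [PySem.Chars.isIn_iff_infix]
  · have : ¬ ([x] <:+: [y]) := by
      rintro ⟨s, t, hst⟩
      have hl := congrArg List.length hst
      have hs : s = [] := by cases s <;> simp_all
      have ht : t = [] := by cases t <;> simp_all
      subst hs; subst ht
      simp at hst
      exact h hst.symm
    simp [(PySem.Chars.isIn_eq_false_iff [x] [y]).2 this, h]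

-- A's inner loop counts occurrences of x in the sorted lowered list = count in the lowered list
theorem inner_count (x : Char) (ls : List Char) :
    (PySem.List.sorted ls (fun c => c) false).foldl
      (fun n y => if PySem.Chars.isIn [x] [y] then n + 1 else n) (0 : Int) = (ls.count x : Int) := by
  rw [PySem.List.foldl_congr_mem _ _ (fun n y => if y == x then n + 1 else n) _
        (by intro acc y _; rw [isIn_single]),
      PySem.List.foldl_beq_add_one]
  have := (PySem.List.sorted_perm ls (fun c => c) false).count_eq x
  simp [this]

theorem consonants_spec : Claim_equal_consonants := by
  intro text _
  unfold Spec_consonants consonants consonants_alt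
  apply congrArg PySem.Dict.items
  apply PySem.List.foldl_congr_mem
  intro d x hx
  rw [inner_count, PySem.Dict.getD_foldl_insert_add_one]
  simp
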